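-- pv_equiv track=rewrite | github.com/allyssonifx/algoritmos | lista5/merge.py | apenas_numeros
-- ===== SOURCE A (Python) =====
-- def merge_sort(nums):
--     if len(nums) > 1:
--         mid = len(nums) // 2
--         left_half = nums[:mid]
--         right_half = nums[mid:]
--         merge_sort(left_half)
--         merge_sort(right_half)
--         i = j = k = 0
--         while i < len(left_half) and j < len(right_half):
--             if left_half[i] < right_half[j]:
--                 nums[k] = left_half[i]
--                 i += 1
--             else:
--                 nums[k] = right_half[j]
--                 j += 1
--             k += 1
--         while i < len(left_half):
--             nums[k] = left_half[i]
--             i += 1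
--             k += 1
--         while j < len(right_half):
--             nums[k] = right_half[j]
--             j += 1
--             k += 1
--     return nums
--
-- def apenas_numeros(nuns):
--     numeros = []
--     for c in nuns:
--         num = ''
--         for x in range(len(c)):
--             if c[x].isdigit():
--                 num += c[x]
--             elif num:
--                 numeros.append(int(num))
--                 num = ''
--         if num:
--             numeros.append(int(num))
--     return merge_sort(numeros)
-- ===== SOURCE B (Python) =====
-- def apenas_numeros(nuns):
--     numeros = []
--     for c in nuns:
--         i = 0
--         while i < len(c):
--             if c[i].isdigit():
--                 j = i
--                 while j < len(c) and c[j].isdigit():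
--                     j += 1
--                 numeros.append(int(c[i:j]))
--                 i = j
--             else:
--                 i += 1
--     return sorted(numeros)
-- ===== Notes on version B (the rewrite author's own statement) =====
-- stated objective: alternative
-- what changed: B replaces A's char-by-char accumulator/flush state machine with a two-pointer scan over maximal digit runs, and replaces A's hand-written recursive merge sort with the built-in sorted().
import Mathlib
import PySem

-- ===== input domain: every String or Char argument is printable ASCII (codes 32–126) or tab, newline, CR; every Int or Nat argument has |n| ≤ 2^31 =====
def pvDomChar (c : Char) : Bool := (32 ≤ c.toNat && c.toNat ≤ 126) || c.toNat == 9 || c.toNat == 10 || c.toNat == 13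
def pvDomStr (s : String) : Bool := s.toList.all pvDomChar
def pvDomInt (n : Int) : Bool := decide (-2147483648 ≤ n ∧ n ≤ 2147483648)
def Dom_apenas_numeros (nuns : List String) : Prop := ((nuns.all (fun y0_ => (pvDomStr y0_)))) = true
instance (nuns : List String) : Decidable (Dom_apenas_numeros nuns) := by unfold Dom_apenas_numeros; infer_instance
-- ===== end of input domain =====

-- B replaces A's char-accumulator/flush state machine with a two-pointer scan over maximal
-- digit runs and replaces the hand-written recursive merge sort with the built-in sorted();
-- alternative decomposition, same asymptotic cost. A mutates only its local list, so no
-- caller-visible side effects are lost.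

-- ===== PORT A =====

-- int(num) for a nonempty ASCII digit run (exact there: on Dom every char passing
-- isdigit() is '0'..'9', so int() never raises and has this value).
def pvDigitVal (ds : List Char) : Int :=
  ds.foldl (fun a ch => a * 10 + ((ch.toNat : Int) - 48)) 0

-- one step of A's inner loop; on Dom, Char.isDigit is exactly Python's str.isdigit.
-- ('for x in range(len(c)): … c[x] …' visits exactly the chars in order, ported as a fold
-- over the char list.)
def pvStepA (st : List Char × List Int) (ch : Char) : List Char × List Int :=
  if ch.isDigit then (st.1 ++ [ch], st.2)
  else if st.1 ≠ [] then ([], st.2 ++ [pvDigitVal st.1])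
  else ([], st.2)

-- A's per-string loop body including the trailing 'if num:' flush
def pvScanA (c : List Char) (numeros : List Int) : List Int :=
  let st := c.foldl pvStepA ([], numeros)
  if st.1 ≠ [] then st.2 ++ [pvDigitVal st.1] else st.2

-- A's three while loops write nums[k] for k = 0,1,…,len-1 in order; ported as building the
-- merged list front-to-back (same comparisons, same order, no mutation in Lean).
def pvMerge : List Int → List Int → List Int
  | [], r => r
  | a :: l, [] => a :: l
  | a :: l, b :: r => if a < b then a :: pvMerge l (b :: r) else b :: pvMerge (a :: l) r

-- nums[:mid] / nums[mid:] with 0 ≤ mid ≤ len are take/drop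
def pvMergeSort (nums : List Int) : List Int :=
  if nums.length > 1 then
    let mid := nums.length / 2
    pvMerge (pvMergeSort (nums.take mid)) (pvMergeSort (nums.drop mid))
  else nums
termination_by nums.length
decreasing_by
  · simp; omega
  · simp; omega

def apenas_numeros (nuns : List String) : List Int :=
  pvMergeSort (nuns.foldl (fun numeros c => pvScanA c.toList numeros) [])

-- ===== PORT B =====

-- B's inner 'while j < len(c) and c[j].isdigit(): j += 1'
def pvRunEnd (s : List Char) (j : Nat) : Nat :=
  if h : j < s.length then
    if s[j].isDigit then pvRunEnd s (j + 1) else j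
  else j
termination_by s.length - j

-- the loop index never moves backwards (cited by pvLoopB's termination proof)
theorem pvRunEnd_ge (s : List Char) (j : Nat) : j ≤ pvRunEnd s j := by
  unfold pvRunEnd
  split
  · split
    · exact Nat.le_trans (Nat.le_succ j) (pvRunEnd_ge s (j + 1))
    · exact Nat.le_refl j
  · exact Nat.le_refl j
termination_by s.length - j

-- one unfolding of the inner while (cited by pvLoopB's termination proof)
theorem pvRunEnd_succ (s : List Char) (i : Nat) (h : i < s.length)
    (hd : s[i].isDigit = true) : pvRunEnd s i = pvRunEnd s (i + 1) := by
  rw [pvRunEnd, dif_pos h, if_pos hd]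

-- B's outer while loop; c[i:j] with 0 ≤ i ≤ j ≤ len is drop/take
def pvLoopB (s : List Char) (i : Nat) (acc : List Int) : List Int :=
  if h : i < s.length then
    if s[i].isDigit then
      let j := pvRunEnd s i
      pvLoopB s j (acc ++ [pvDigitVal ((s.drop i).take (j - i))])
    else pvLoopB s (i + 1) acc
  else acc
termination_by s.length - i
decreasing_by
  · rename_i hd
    have h1 := pvRunEnd_ge s (i + 1)
    have h2 := pvRunEnd_succ s i h hd
    omega
  · omega

def apenas_numeros_alt (nuns : List String) : List Int :=
  PySem.List.sorted (nuns.foldl (fun numeros c => pvLoopB c.toList 0 numeros) [])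
    (fun x => x) false

-- ===== PRECONDITION & SPEC =====
def Spec_apenas_numeros (nuns : List String) (out : List Int) : Prop := out = apenas_numeros_alt nuns
instance (nuns : List String) (out : List Int) : Decidable (Spec_apenas_numeros nuns out) := by unfold Spec_apenas_numeros; infer_instance

-- ===== CLAIM (what is proved, stated in full; the proofs are below) =====
def Claim_equal_apenas_numeros : Prop := ∀ (nuns : List String), Dom_apenas_numeros nuns → Spec_apenas_numeros nuns (apenas_numeros nuns)

-- ===== LEMMAS AND PROOFS =====

-- reference parse: the maximal digit runs of a string, as ints, in order
def pvParse : List Char → List Int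
  | [] => []
  | ch :: cs =>
    if ch.isDigit then
      pvDigitVal (ch :: cs.takeWhile Char.isDigit) :: pvParse (cs.dropWhile Char.isDigit)
    else pvParse cs
termination_by l => l.length
decreasing_by
  · have := List.length_dropWhile_le (p := Char.isDigit) (l := cs); simp; omega
  · simp

theorem pvScanA_flush (cs : List Char) : ∀ (num : List Char) (nums : List Int),
    (let st := cs.foldl pvStepA (num, nums);
     if st.1 ≠ [] then st.2 ++ [pvDigitVal st.1] else st.2) =
    if num = [] then nums ++ pvParse cs
    else nums ++ pvDigitVal (num ++ cs.takeWhile Char.isDigit) :: pvParse (cs.dropWhile Char.isDigit) := by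
  induction cs with
  | nil =>
    intro num nums
    by_cases h : num = [] <;> simp [h, pvParse]
  | cons ch cs ih =>
    intro num nums
    simp only [List.foldl_cons]
    by_cases hd : ch.isDigit
    · rw [show pvStepA (num, nums) ch = (num ++ [ch], nums) by simp [pvStepA, hd]]
      rw [ih]
      simp only [List.append_ne_nil_of_right_ne_nil, ne_eq, List.cons_ne_nil,
        not_false_eq_true, if_neg]
      by_cases h : num = []
      · simp [h, pvParse, hd]
      · simp [h, hd]
    · rw [show pvStepA (num, nums) ch =
          ([], if num ≠ [] then nums ++ [pvDigitVal num] else nums) by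
        by_cases h : num = [] <;> simp [pvStepA, hd, h]]
      rw [ih]
      by_cases h : num = []
      · simp [h, pvParse, hd]
      · simp [h, pvParse, hd]

theorem pvScanA_parse (c : List Char) (nums : List Int) :
    pvScanA c nums = nums ++ pvParse c := by
  have := pvScanA_flush c [] nums
  simpa [pvScanA] using this

theorem take_takeWhile_length {α : Type} (p : α → Bool) (l : List α) :
    l.take (l.takeWhile p).length = l.takeWhile p := by
  induction l with
  | nil => simp
  | cons a l ih =>
    by_cases h : p a
    · simp [h, ih]
    · simp [h]

theorem drop_takeWhile_length {α : Type} (p : α → Bool) (l : List α) :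
    l.drop (l.takeWhile p).length = l.dropWhile p := by
  induction l with
  | nil => simp
  | cons a l ih =>
    by_cases h : p a
    · simp [h, ih]
    · simp [h]

theorem pvRunEnd_spec (s : List Char) (i : Nat) :
    pvRunEnd s i = i + ((s.drop i).takeWhile Char.isDigit).length := by
  unfold pvRunEnd
  split
  · rename_i h
    have hcons : s.drop i = s[i] :: s.drop (i + 1) := List.drop_eq_getElem_cons h
    by_cases hd : s[i].isDigit
    · rw [if_pos hd, pvRunEnd_spec s (i + 1), hcons, List.takeWhile_cons, if_pos hd]
      simp only [List.length_cons]
      omega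
    · rw [if_neg hd, hcons, List.takeWhile_cons, if_neg hd]
      simp
  · rename_i h
    rw [List.drop_eq_nil_of_le (by omega)]
    simp
termination_by s.length - i

theorem pvLoopB_parse (s : List Char) (i : Nat) (acc : List Int) :
    pvLoopB s i acc = acc ++ pvParse (s.drop i) := by
  induction i, acc using pvLoopB.induct s with
  | case1 i acc h hd j ih =>
    have hre := pvRunEnd_spec s i
    have hcons : s.drop i = s[i] :: s.drop (i + 1) := List.drop_eq_getElem_cons h
    set t := (s.drop i).takeWhile Char.isDigit with ht
    rw [pvLoopB, dif_pos h, if_pos hd]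
    rw [show (have j := pvRunEnd s i;
          pvLoopB s j (acc ++ [pvDigitVal ((s.drop i).take (j - i))])) =
        pvLoopB s (pvRunEnd s i)
          (acc ++ [pvDigitVal ((s.drop i).take (pvRunEnd s i - i))]) from rfl]
    have ih' : pvLoopB s (pvRunEnd s i)
        (acc ++ [pvDigitVal ((s.drop i).take (pvRunEnd s i - i))]) =
        (acc ++ [pvDigitVal ((s.drop i).take (pvRunEnd s i - i))]) ++
          pvParse (s.drop (pvRunEnd s i)) := ih
    rw [ih']
    have h1 : (s.drop i).take (pvRunEnd s i - i) = t := by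
      rw [hre, show i + t.length - i = t.length by omega, take_takeWhile_length]
    have h2 : s.drop (pvRunEnd s i) = (s.drop i).dropWhile Char.isDigit := by
      rw [← drop_takeWhile_length Char.isDigit (s.drop i), List.drop_drop, hre,
        Nat.add_comm]
    rw [h1, h2]
    conv_rhs => rw [hcons, pvParse]
    rw [if_pos hd]
    have ht' : t = s[i] :: (s.drop (i + 1)).takeWhile Char.isDigit := by
      rw [ht, hcons, List.takeWhile_cons, if_pos hd]
    have hdw : (s.drop i).dropWhile Char.isDigit = (s.drop (i + 1)).dropWhile Char.isDigit := by
      rw [hcons, List.dropWhile_cons, if_pos hd]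
    rw [hdw, ← ht']
    simp
  | case2 i acc h hd ih =>
    rw [pvLoopB, dif_pos h, if_neg hd, ih,
      List.drop_eq_getElem_cons h, pvParse, if_neg hd]
  | case3 i acc h =>
    rw [pvLoopB, dif_neg h, List.drop_eq_nil_of_le (by omega)]
    simp [pvParse]

theorem pvMerge_perm (l r : List Int) : (pvMerge l r).Perm (l ++ r) := by
  unfold pvMerge
  split
  · simp
  · simp
  · rename_i a l' b r'
    split
    · exact (pvMerge_perm l' (b :: r')).cons a
    · refine ((pvMerge_perm (a :: l') r').cons b).trans ?_
      exact (List.perm_middle (a := b) (l₁ := a :: l') (l₂ := r')).symm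
termination_by l.length + r.length

theorem mem_pvMerge {x : Int} {l r : List Int} (h : x ∈ pvMerge l r) : x ∈ l ∨ x ∈ r := by
  have := (pvMerge_perm l r).mem_iff.mp h
  simpa using this

theorem pvMerge_pairwise (l r : List Int)
    (hl : l.Pairwise (· ≤ ·)) (hr : r.Pairwise (· ≤ ·)) :
    (pvMerge l r).Pairwise (· ≤ ·) := by
  unfold pvMerge
  split
  · exact hr
  · exact hl
  · rename_i a l' b r'
    rw [List.pairwise_cons] at hl hr
    split
    · rename_i hab
      refine List.Pairwise.cons ?_
        (pvMerge_pairwise l' (b :: r') hl.2 (List.pairwise_cons.mpr hr))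
      intro y hy
      rcases mem_pvMerge hy with hy | hy
      · exact hl.1 y hy
      · rcases List.mem_cons.mp hy with rfl | hy
        · exact le_of_lt hab
        · exact le_trans (le_of_lt hab) (hr.1 y hy)
    · rename_i hab
      have hba : b ≤ a := by omega
      refine List.Pairwise.cons ?_
        (pvMerge_pairwise (a :: l') r' (List.pairwise_cons.mpr hl) hr.2)
      intro y hy
      rcases mem_pvMerge hy with hy | hy
      · rcases List.mem_cons.mp hy with rfl | hy
        · exact hba
        · exact le_trans hba (hl.1 y hy)
      · exact hr.1 y hy
termination_by l.length + r.length

theorem pvMergeSort_perm (nums : List Int) : (pvMergeSort nums).Perm nums := by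
  unfold pvMergeSort
  split
  · refine (pvMerge_perm _ _).trans ?_
    refine ((pvMergeSort_perm _).append (pvMergeSort_perm _)).trans ?_
    rw [List.take_append_drop]
  · exact List.Perm.refl nums
termination_by nums.length
decreasing_by
  · simp; omega
  · simp; omega

theorem pvMergeSort_pairwise (nums : List Int) : (pvMergeSort nums).Pairwise (· ≤ ·) := by
  unfold pvMergeSort
  split
  · exact pvMerge_pairwise _ _ (pvMergeSort_pairwise _) (pvMergeSort_pairwise _)
  · rename_i h
    match nums, h with
    | [], _ => simp
    | [a], _ => simp
    | a :: b :: t, h => simp at h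
termination_by nums.length
decreasing_by
  · simp; omega
  · simp; omega

theorem fold_scan_eq_loop (nuns : List String) : ∀ (init : List Int),
    nuns.foldl (fun numeros c => pvScanA c.toList numeros) init =
    nuns.foldl (fun numeros c => pvLoopB c.toList 0 numeros) init := by
  induction nuns with
  | nil => intro init; rfl
  | cons c cs ih =>
    intro init
    simp only [List.foldl_cons]
    rw [pvScanA_parse, pvLoopB_parse]
    simp only [List.drop_zero]
    exact ih _

-- ===== VERDICT (by name: the statement is the Claim_ definition above) =====
theorem apenas_numeros_spec : Claim_equal_apenas_numeros := by
  intro nuns _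
  show apenas_numeros nuns = apenas_numeros_alt nuns
  unfold apenas_numeros apenas_numeros_alt
  rw [← fold_scan_eq_loop]
  exact (PySem.List.sorted_id_eq_of_perm_of_pairwise _ _
    (pvMergeSort_perm _) (pvMergeSort_pairwise _)).symm
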